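-- pv_equiv track=rewrite | github.com/cadybaltz/2023-Advent-of-Code | day01.py | find_first_and_last
-- ===== SOURCE A (Python) =====
-- def find_first_and_last(input):
--     number_dict = {
--         'one': '1',
--         'two': '2',
--         'three': '3',
--         'four': '4',
--         'five': '5',
--         'six': '6',
--         'seven': '7',
--         'eight': '8',
--         'nine': '9'
--     }
--
--     first = ""
--
--     # find the first number
--     x = 0
--     while x < len(input) and len(first) == 0:
--         for word, number in number_dict.items():
--             if len(word) > len(input) - x:
--                 continue
--             if input[x:x + len(word)] == word:
--                 first = number
--                 break
--         if len(first) == 0: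
--             if input[x].isdigit():
--                 first = str(input[x])
--         x += 1
--
--     # find the last number
--     x = len(input) - 1
--     while x >= 0:
--         if input[x].isdigit():
--             return first, input[x]
--
--         for word, number in number_dict.items():
--             if len(word) > len(input) - x:
--                 continue
--
--             if input[x:x + len(word)] == word:
--                 return first, number
--         x -= 1
-- ===== SOURCE B (Python) =====
-- def find_first_and_last(input):
--     words = {
--         'one': '1', 'two': '2', 'three': '3', 'four': '4', 'five': '5',
--         'six': '6', 'seven': '7', 'eight': '8', 'nine': '9'
--     }
--     found = []
--     for i, ch in enumerate(input):
--         if ch.isdigit():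
--             found.append(ch)
--         else:
--             for w, d in words.items():
--                 if input.startswith(w, i):
--                     found.append(d)
--                     break
--     if not found:
--         return None
--     return found[0], found[-1]
-- ===== Notes on version B (the rewrite author's own statement) =====
-- stated objective: simpler
-- what changed: Replaced A's two directional while-loops (forward scan with an early-exit flag, separate backward scan with early returns) by one forward pass that collects every match into a list and returns (found[0], found[-1]).
-- outside the precondition, e.g. on find_first_and_last('xyz'): A returns None, B returns None
import Mathlib
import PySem

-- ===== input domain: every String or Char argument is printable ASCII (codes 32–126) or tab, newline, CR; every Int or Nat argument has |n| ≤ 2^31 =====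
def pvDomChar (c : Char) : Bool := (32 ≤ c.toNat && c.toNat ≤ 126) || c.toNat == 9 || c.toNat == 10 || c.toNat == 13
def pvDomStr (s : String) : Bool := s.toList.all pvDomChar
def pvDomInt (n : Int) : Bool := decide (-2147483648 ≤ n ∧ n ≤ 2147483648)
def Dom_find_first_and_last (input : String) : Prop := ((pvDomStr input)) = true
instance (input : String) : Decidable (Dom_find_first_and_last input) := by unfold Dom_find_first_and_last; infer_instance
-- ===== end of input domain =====

-- B replaces A's two directional while-loops by one forward pass that collects all matches
-- and returns the first and last; objective: simpler (no speed claim).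

-- ===== PORT A =====
-- the dict number_dict in insertion order
def ffalWords : List (String × String) :=
  [("one","1"),("two","2"),("three","3"),("four","4"),("five","5"),
   ("six","6"),("seven","7"),("eight","8"),("nine","9")]

-- forward while loop: x counts up while `first` is empty; fuel = remaining iterations (= len - x at call).
-- `input[x:x+len(word)] == word` is ported as take/drop on the char list (exact here: 0 ≤ x ≤ len);
-- `input[x].isdigit()` as Char.isDigit on cs.getD x (exact: x < len at every use, ASCII domain)
def ffalFirstLoop (cs : List Char) : Nat → Nat → String → String
  | 0, _, first => first
  | fuel+1, x, first =>
    if x < cs.length ∧ first.length = 0 then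
      let first1 :=
        match ffalWords.find? (fun wn =>
            decide (wn.1.length ≤ cs.length - x) && ((cs.drop x).take wn.1.length == wn.1.toList)) with
        | some wn => wn.2
        | none => first
      let first2 :=
        if first1.length = 0 ∧ (cs.getD x 'a').isDigit then String.singleton (cs.getD x 'a') else first1
      ffalFirstLoop cs fuel (x+1) first2
    else first

-- backward while loop: argument k means Python index x = k-1; k = 0 is `x < 0` (fall through, None)
def ffalLastLoop (cs : List Char) (first : String) : Nat → Option (String × String)
  | 0 => none
  | k+1 =>
    if (cs.getD k 'a').isDigit then some (first, String.singleton (cs.getD k 'a'))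
    else
      match ffalWords.find? (fun wn =>
          decide (wn.1.length ≤ cs.length - k) && ((cs.drop k).take wn.1.length == wn.1.toList)) with
      | some wn => some (first, wn.2)
      | none => ffalLastLoop cs first k

def find_first_and_last (input : String) : String × String :=
  let cs := input.toList
  let first := ffalFirstLoop cs cs.length 0 ""
  -- Python A returns None when the backward loop falls through; that case is outside Pre_
  (ffalLastLoop cs first cs.length).getD ("", "")

-- ===== PORT B =====
-- B's per-index match: a digit char, else the first number-word starting there
-- (`input.startswith(w, i)` is ported as isPrefixOf on the dropped char list; exact for 0 ≤ i)
def ffalMatchAt (cs : List Char) (i : Nat) : Option String :=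
  if (cs.getD i 'a').isDigit then some (String.singleton (cs.getD i 'a'))
  else (ffalWords.find? (fun wn => wn.1.toList.isPrefixOf (cs.drop i))).map Prod.snd

def find_first_and_last_alt (input : String) : String × String :=
  let cs := input.toList
  let found := (List.range cs.length).filterMap (ffalMatchAt cs)
  match found.head?, found.getLast? with
  | some f, some l => (f, l)
  | _, _ => ("", "")  -- Python B returns None here; outside Pre_

-- ===== PRECONDITION & SPEC =====
-- Pre_ excludes exactly the strings containing no digit and no number-word: on those Python A
-- returns None (not a pair of strings), and Python B returns None there too.
def Pre_find_first_and_last (input : String) : Prop :=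
  ∃ i ∈ List.range input.toList.length,
    (input.toList.getD i 'a').isDigit = true ∨
    ∃ wn ∈ ffalWords, wn.1.toList.isPrefixOf (input.toList.drop i) = true
instance (input : String) : Decidable (Pre_find_first_and_last input) := by
  unfold Pre_find_first_and_last; infer_instance

def pvWitness_find_first_and_last : String := "a1two"

def Spec_find_first_and_last (input : String) (out : String × String) : Prop := out = find_first_and_last_alt input
instance (input : String) (out : String × String) : Decidable (Spec_find_first_and_last input out) := by unfold Spec_find_first_and_last; infer_instance

-- ===== CLAIM (what is proved, stated in full; the proofs are below) =====
def Claim_equal_find_first_and_last : Prop := ∀ (input : String), Dom_find_first_and_last input → Pre_find_first_and_last input → Spec_find_first_and_last input (find_first_and_last input)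

-- ===== LEMMAS AND PROOFS =====

-- A's per-index match in its loops' order: the word scan first, then the digit test
def ffalMatchA (cs : List Char) (i : Nat) : Option String :=
  match ffalWords.find? (fun wn =>
      decide (wn.1.length ≤ cs.length - i) && ((cs.drop i).take wn.1.length == wn.1.toList)) with
  | some wn => some wn.2
  | none =>
    if (cs.getD i 'a').isDigit then some (String.singleton (cs.getD i 'a')) else none

-- A's slice-with-guard predicate equals B's prefix test
theorem ffal_pred_eq (cs : List Char) (i : Nat) (wn : String × String) :
    (decide (wn.1.length ≤ cs.length - i) && ((cs.drop i).take wn.1.length == wn.1.toList))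
      = wn.1.toList.isPrefixOf (cs.drop i) := by
  have hlen : wn.1.length = wn.1.toList.length := (String.length_toList (s := wn.1)).symm
  rw [Bool.eq_iff_iff]
  simp only [Bool.and_eq_true, decide_eq_true_eq, beq_iff_eq, List.isPrefixOf_iff_prefix]
  constructor
  · rintro ⟨hle, htake⟩
    exact htake ▸ List.take_prefix _ _
  · intro hpre
    have h1 := hpre.length_le
    rw [List.length_drop] at h1
    refine ⟨by omega, ?_⟩
    have := List.prefix_iff_eq_take.mp hpre
    rw [hlen]; exact this.symm

theorem ffal_getD_drop (cs : List Char) (i : Nat) (d : Char) :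
    cs.getD i d = (cs.drop i).headD d := by
  simp [List.getD_eq_getElem?_getD, List.headD_eq_head?_getD, List.head?_drop]

-- if cs.getD i is a digit, no number-word starts at i (every word starts with a letter)
theorem ffal_digit_no_word (cs : List Char) (i : Nat) (h : (cs.getD i 'a').isDigit = true) :
    ffalWords.find? (fun wn => wn.1.toList.isPrefixOf (cs.drop i)) = none := by
  rw [List.find?_eq_none]
  intro wn hmem
  fin_cases hmem <;>
  · simp only [List.isPrefixOf_iff_prefix]
    rintro ⟨t, ht⟩
    rw [ffal_getD_drop, ← ht] at h
    simp [List.cons_append, Char.isDigit] at h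

theorem ffal_matchA_eq (cs : List Char) (i : Nat) : ffalMatchA cs i = ffalMatchAt cs i := by
  unfold ffalMatchA ffalMatchAt
  have hp : (fun wn : String × String =>
      decide (wn.1.length ≤ cs.length - i) && ((cs.drop i).take wn.1.length == wn.1.toList))
      = (fun wn => wn.1.toList.isPrefixOf (cs.drop i)) := funext (ffal_pred_eq cs i)
  rw [hp]
  by_cases hd : (cs.getD i 'a').isDigit = true
  · rw [ffal_digit_no_word cs i hd]
    simp
  · simp only [Bool.not_eq_true] at hd
    rw [hd]
    cases hf : ffalWords.find? (fun wn => wn.1.toList.isPrefixOf (cs.drop i)) <;> simp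

theorem ffal_match_ne_empty (cs : List Char) (i : Nat) (v : String)
    (h : ffalMatchAt cs i = some v) : v.length ≠ 0 := by
  unfold ffalMatchAt at h
  split at h
  · simp only [Option.some.injEq] at h
    subst h; simp [String.length]
  · rw [Option.map_eq_some_iff] at h
    obtain ⟨wn, hf, hv⟩ := h
    have hm := List.mem_of_find?_eq_some hf
    subst hv
    fin_cases hm <;> decide

theorem ffal_firstLoop_stop (cs : List Char) (fuel x : Nat) (v : String) (hv : v.length ≠ 0) :
    ffalFirstLoop cs fuel x v = v := by
  cases fuel with
  | zero => rfl
  | succ n => simp [ffalFirstLoop, hv]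

theorem ffal_firstLoop_eq (cs : List Char) (fuel : Nat) : ∀ x, x + fuel = cs.length →
    ffalFirstLoop cs fuel x "" = (((List.range' x fuel).filterMap (ffalMatchAt cs)).headD "") := by
  induction fuel with
  | zero => intro x hx; simp [ffalFirstLoop]
  | succ n ih =>
    intro x hx
    have hlt : x < cs.length := by omega
    have hA := (ffal_matchA_eq cs x).symm
    rw [List.range'_succ, List.filterMap_cons, ffalFirstLoop]
    simp only [hlt, true_and, if_pos, String.length_empty]
    cases hf : ffalWords.find? (fun wn =>
        decide (wn.1.length ≤ cs.length - x) && ((cs.drop x).take wn.1.length == wn.1.toList)) with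
    | some wn =>
      have hm : ffalMatchAt cs x = some wn.2 := by rw [hA]; unfold ffalMatchA; rw [hf]
      have hne : wn.2.length ≠ 0 := ffal_match_ne_empty _ _ _ hm
      simp only [hm]
      rw [if_neg (by exact fun hc => hne hc.1)]
      rw [ffal_firstLoop_stop _ _ _ _ hne]
      simp
    | none =>
      by_cases hd : (cs.getD x 'a').isDigit = true
      · have hm : ffalMatchAt cs x = some (String.singleton (cs.getD x 'a')) := by
          unfold ffalMatchAt; rw [if_pos hd]
        have hne : (String.singleton (cs.getD x 'a')).length ≠ 0 := ffal_match_ne_empty _ _ _ hm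
        simp only [hm]
        rw [if_pos ⟨rfl, hd⟩, ffal_firstLoop_stop _ _ _ _ hne]
        simp
      · have hm : ffalMatchAt cs x = none := by
          rw [hA]; unfold ffalMatchA; rw [hf]; rw [if_neg hd]
        simp only [hm]
        rw [if_neg (by exact fun hc => hd hc.2)]
        exact ih (x+1) (by omega)

theorem ffal_lastLoop_eq (cs : List Char) (first : String) (k : Nat) :
    ffalLastLoop cs first k
      = (((List.range k).filterMap (ffalMatchAt cs)).getLast?).map (fun l => (first, l)) := by
  induction k with
  | zero => simp [ffalLastLoop]
  | succ k ih =>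
    have hA := (ffal_matchA_eq cs k).symm
    rw [List.range_succ, List.filterMap_append, ffalLastLoop]
    by_cases hd : (cs.getD k 'a').isDigit = true
    · have hm : ffalMatchAt cs k = some (String.singleton (cs.getD k 'a')) := by
        unfold ffalMatchAt; rw [if_pos hd]
      rw [if_pos hd]
      simp only [List.filterMap_cons, hm, List.filterMap_nil, List.getLast?_concat, Option.map_some]
    · rw [if_neg hd]
      cases hf : ffalWords.find? (fun wn =>
          decide (wn.1.length ≤ cs.length - k) && ((cs.drop k).take wn.1.length == wn.1.toList)) with
      | some wn =>
        have hm : ffalMatchAt cs k = some wn.2 := by rw [hA]; unfold ffalMatchA; rw [hf]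
        simp only [List.filterMap_cons, hm, List.filterMap_nil, List.getLast?_concat, Option.map_some]
      | none =>
        have hm : ffalMatchAt cs k = none := by
          rw [hA]; unfold ffalMatchA; rw [hf]; rw [if_neg hd]
        simp only [hm, List.filterMap_nil, List.filterMap_cons_none, List.append_nil]
        exact ih

theorem ffal_pre_found (input : String) (hp : Pre_find_first_and_last input) :
    (List.range input.toList.length).filterMap (ffalMatchAt input.toList) ≠ [] := by
  obtain ⟨i, hi, hcase⟩ := hp
  intro hnil
  rw [List.filterMap_eq_nil_iff] at hnil
  have hnone := hnil i hi
  unfold ffalMatchAt at hnone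
  rcases hcase with hd | ⟨wn, hmem, hpre⟩
  · rw [if_pos hd] at hnone; exact Option.some_ne_none _ hnone
  · split at hnone
    · exact Option.some_ne_none _ hnone
    · rw [Option.map_eq_none_iff, List.find?_eq_none] at hnone
      exact absurd hpre (by simpa using hnone wn hmem)

-- ===== VERDICT (by name: the statement is the Claim_ definition above) =====
theorem find_first_and_last_spec : Claim_equal_find_first_and_last := by
  intro input _ hp
  unfold Spec_find_first_and_last find_first_and_last find_first_and_last_alt
  dsimp only
  have hne := ffal_pre_found input hp
  set cs := input.toList with hcs
  set found := (List.range cs.length).filterMap (ffalMatchAt cs) with hfound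
  have hfirst : ffalFirstLoop cs cs.length 0 "" = found.headD "" := by
    rw [ffal_firstLoop_eq cs cs.length 0 (by omega), hfound, List.range_eq_range']
  rw [hfirst, ffal_lastLoop_eq, ← hfound]
  cases hfd : found with
  | nil => exact absurd hfd hne
  | cons f rest =>
    cases hg : (f :: rest).getLast? with
    | none => simp at hg
    | some g =>
      simp only [List.headD_cons, List.head?_cons, Option.map_some, Option.getD_some]
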